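-- pv_equiv track=rewrite | github.com/skyruh/uantitative-trading-system | src/data/data_storage.py | _validate_symbol
-- ===== SOURCE A (Python) =====
-- def _validate_symbol(symbol: str) -> str:
--     """Validate and clean symbol name."""
--     if not symbol or not isinstance(symbol, str):
--         raise ValueError("Symbol must be a non-empty string")
--
--     # Clean symbol name for file system
--     symbol = symbol.strip().upper()
--     symbol = symbol.replace('.NS', '').replace('.BO', '')
--
--     # Remove invalid characters for file names
--     invalid_chars = '<>:"/\\|?*'
--     for char in invalid_chars:
--         symbol = symbol.replace(char, '_')
--
--     return symbol
-- ===== SOURCE B (Python) =====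
-- def _validate_symbol(symbol: str) -> str:
--     """Validate and clean symbol name."""
--     if not symbol or not isinstance(symbol, str):
--         raise ValueError("Symbol must be a non-empty string")
--
--     cleaned = symbol.strip().upper().replace('.NS', '').replace('.BO', '')
--
--     # one left-to-right pass building the output list, instead of nine
--     # whole-string replace passes
--     bad = '<>:"/\\|?*'
--     out = []
--     for ch in cleaned:
--         out.append('_' if ch in bad else ch)
--     return ''.join(out)
-- ===== Notes on version B (the rewrite author's own statement) =====
-- stated objective: idiomatic
-- what changed: A runs nine whole-string .replace passes (one per invalid character); B makes a single left-to-right pass over the cleaned string, appending an underscore or the character itself into an output list and joining once.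
-- outside the precondition, e.g. on _validate_symbol(''): A raises ValueError, B raises ValueError
import Mathlib
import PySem

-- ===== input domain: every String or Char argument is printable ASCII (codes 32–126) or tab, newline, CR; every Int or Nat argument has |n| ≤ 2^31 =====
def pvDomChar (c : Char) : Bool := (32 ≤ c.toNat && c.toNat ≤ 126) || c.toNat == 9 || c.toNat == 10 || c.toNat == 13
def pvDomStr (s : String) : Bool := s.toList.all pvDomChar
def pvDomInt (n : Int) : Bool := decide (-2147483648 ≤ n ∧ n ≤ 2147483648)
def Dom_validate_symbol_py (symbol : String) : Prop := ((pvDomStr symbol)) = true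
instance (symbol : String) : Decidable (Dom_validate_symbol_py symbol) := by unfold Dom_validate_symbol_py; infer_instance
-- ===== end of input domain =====

-- B replaces A's nine whole-string replace passes by one left-to-right pass building the output (idiomatic; return value only).

-- ===== PORT A =====
-- guard 'if not symbol: raise ValueError' is excluded by Pre_
def validate_symbol_py (symbol : String) : String :=
  let s1 := PySem.Str.upper (PySem.Str.strip symbol)
  let s2 := PySem.Str.replace (PySem.Str.replace s1 ".NS" "") ".BO" ""
  let invalid_chars : List Char := "<>:\"/\\|?*".toList
  invalid_chars.foldl (fun s ch => PySem.Str.replace s (String.ofList [ch]) "_") s2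

-- ===== PORT B =====
def vsBad : List Char := "<>:\"/\\|?*".toList

-- the single pass of Source B: the for/append loop, as structural recursion building the output list
def vsSanitize : List Char → List Char
  | [] => []
  | c :: rest => (if vsBad.contains c then '_' else c) :: vsSanitize rest

def validate_symbol_py_alt (symbol : String) : String :=
  String.ofList
    (vsSanitize
      (PySem.Str.replace
        (PySem.Str.replace (PySem.Str.upper (PySem.Str.strip symbol)) ".NS" "") ".BO" "").toList)

-- ===== PRECONDITION & SPEC =====
-- A raises ValueError exactly on the empty string; Pre_ excludes it.
def Pre_validate_symbol_py (symbol : String) : Prop := symbol ≠ ""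
instance (symbol : String) : Decidable (Pre_validate_symbol_py symbol) := by unfold Pre_validate_symbol_py; infer_instance
def pvWitness_validate_symbol_py : String := "tcs.ns <>*"

def Spec_validate_symbol_py (symbol : String) (out : String) : Prop := out = validate_symbol_py_alt symbol
instance (symbol : String) (out : String) : Decidable (Spec_validate_symbol_py symbol out) := by unfold Spec_validate_symbol_py; infer_instance

-- ===== CLAIM (what is proved, stated in full; the proofs are below) =====
def Claim_equal_validate_symbol_py : Prop := ∀ (symbol : String), Dom_validate_symbol_py symbol → Pre_validate_symbol_py symbol → Spec_validate_symbol_py symbol (validate_symbol_py symbol)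

-- ===== LEMMAS AND PROOFS =====

-- replacing a single character c by d is a pointwise map
lemma replace_go_single (c d : Char) : ∀ (l : List Char) (fuel : Nat) (acc : List Char), l.length ≤ fuel →
    PySem.Chars.replace.go [c] [d] fuel l acc = acc.reverse ++ l.map (fun x => if x = c then d else x) := by
  intro l
  induction l with
  | nil =>
    intro fuel acc _
    cases fuel <;> simp [PySem.Chars.replace.go]
  | cons h t ih =>
    intro fuel acc hlen
    cases fuel with
    | zero => simp at hlen
    | succ n =>
      rw [PySem.Chars.replace.go]
      by_cases hc : c = h
      · subst hc
        simp only [List.isPrefixOf, BEq.rfl, Bool.true_and, if_pos, List.length_cons,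
          List.length_nil, List.drop_succ_cons, List.drop_zero, List.reverse_cons,
          List.reverse_nil, List.nil_append, List.singleton_append]
        rw [ih n (d :: acc) (by simpa using hlen)]
        simp
      · have : [c].isPrefixOf (h :: t) = false := by
          simp [List.isPrefixOf, hc]
        rw [this]
        simp only [Bool.false_eq_true, if_false]
        rw [ih n (h :: acc) (by simpa using hlen)]
        simp [Ne.symm hc]

lemma replace_single (s : List Char) (c d : Char) :
    PySem.Chars.replace s [c] [d] = s.map (fun x => if x = c then d else x) := by
  rw [PySem.Chars.replace]
  simp only [List.isEmpty_cons, Bool.false_eq_true, if_false]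
  simpa using replace_go_single c d s s.length [] (le_refl _)

lemma replace_char_str (s : String) (ch : Char) :
    PySem.Str.replace s (String.ofList [ch]) "_"
      = String.ofList (s.toList.map (fun x => if x = ch then '_' else x)) := by
  rw [PySem.Str.replace]
  congr 1
  have h1 : (String.ofList [ch]).toList = [ch] := by simp
  have h2 : ("_" : String).toList = ['_'] := rfl
  rw [h1, h2, replace_single]

-- A's foldl of per-character replaces, moved down to character lists
lemma foldl_replace_toList (cs : List Char) : ∀ (s : String),
    List.foldl (fun s ch => PySem.Str.replace s (String.ofList [ch]) "_") s cs
      = String.ofList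
          (List.foldl (fun l ch => l.map (fun x => if x = ch then '_' else x)) s.toList cs) := by
  induction cs with
  | nil => intro s; simp
  | cons c cs ih =>
    intro s
    rw [List.foldl_cons, List.foldl_cons, ih, replace_char_str, String.toList_ofList]

-- a foldl of pointwise single-char replaces is one pointwise pass with a membership test,
-- provided the replacement character '_' is not itself in the replaced set
lemma foldl_map_replace (cs : List Char) (h : cs.contains '_' = false) :
    ∀ (s : List Char),
    List.foldl (fun l ch => l.map (fun x => if x = ch then '_' else x)) s cs
      = s.map (fun x => if cs.contains x then '_' else x) := by
  induction cs with
  | nil => intro s; simp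
  | cons c cs ih =>
    intro s
    simp only [List.contains_cons, Bool.or_eq_false_iff] at h
    rw [List.foldl_cons, ih h.2, List.map_map]
    refine List.map_congr_left (fun x _ => ?_)
    simp only [Function.comp]
    by_cases hc : x = c
    · subst hc
      simp [h.2]
    · by_cases hm : cs.contains x
      · simp [hc]
      · simp [hc]

-- the single recursive pass of B is the pointwise membership map
lemma vsSanitize_eq_map (l : List Char) :
    vsSanitize l = l.map (fun c => if vsBad.contains c then '_' else c) := by
  induction l with
  | nil => rfl
  | cons h t ih => simp [vsSanitize, ih]

-- ===== VERDICT (by name: the statement is the Claim_ definition above) =====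
theorem validate_symbol_py_spec : Claim_equal_validate_symbol_py := by
  intro symbol _ _
  unfold Spec_validate_symbol_py validate_symbol_py validate_symbol_py_alt
  rw [foldl_replace_toList, foldl_map_replace _ (by decide), vsSanitize_eq_map]
  rfl
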